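-- pv_equiv track=rewrite | github.com/anahitahassan/course-schedule-generator | Anahita/old/new.py | getClassesOnDays
-- ===== SOURCE A (Python) =====
-- def getClassesOnDays(s):
--     monday = []
--     for line in s.splitlines():
--         if 'M' in line:
--             monday.append(line[:9])
--     tuesday = []
--     for line in s.splitlines():
--         if 'T' in line:
--             tuesday.append(line[:9])
--     wednesday = []
--     for line in s.splitlines():
--         if 'W' in line:
--             wednesday.append(line[:9])
--     thursday = []
--     for line in s.splitlines():
--         if 'TR' in line:
--             thursday.append(line[:9])
--     friday = []
--     for line in s.splitlines():
--         if 'F' in line: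
--             friday.append(line[:9])
--     dayClasses = [monday, tuesday, wednesday, thursday, friday]
--     return dayClasses
-- ===== SOURCE B (Python) =====
-- def getClassesOnDays(s):
--     monday, tuesday, wednesday, thursday, friday = [], [], [], [], []
--     for line in s.splitlines():
--         if 'M' in line:
--             monday.append(line[:9])
--         if 'T' in line:
--             tuesday.append(line[:9])
--         if 'W' in line:
--             wednesday.append(line[:9])
--         if 'TR' in line:
--             thursday.append(line[:9])
--         if 'F' in line:
--             friday.append(line[:9])
--     return [monday, tuesday, wednesday, thursday, friday]
-- ===== Notes on version B (the rewrite author's own statement) =====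
-- stated objective: simpler
-- what changed: B splits the string once and buckets every line into all matching day lists in a single pass, instead of A's five separate splitlines()+scan loops.
import Mathlib
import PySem

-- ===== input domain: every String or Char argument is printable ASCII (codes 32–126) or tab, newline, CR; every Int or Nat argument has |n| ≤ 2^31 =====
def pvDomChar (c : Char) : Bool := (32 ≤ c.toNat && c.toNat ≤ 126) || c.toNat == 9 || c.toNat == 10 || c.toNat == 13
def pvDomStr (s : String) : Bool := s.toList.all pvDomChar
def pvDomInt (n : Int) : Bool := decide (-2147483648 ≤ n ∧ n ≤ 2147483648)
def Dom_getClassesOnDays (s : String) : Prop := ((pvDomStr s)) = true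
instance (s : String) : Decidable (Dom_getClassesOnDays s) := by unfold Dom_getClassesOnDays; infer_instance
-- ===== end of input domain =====

-- B splits the string once and buckets each line into all matching day lists in a single pass (simpler); A scans splitlines() five times.

-- ===== PORT A =====
def getClassesOnDays (s : String) : List (List String) :=
  let monday := (PySem.Str.splitlines s).foldl
    (fun acc line => if PySem.Str.isIn "M" line then acc ++ [PySem.Str.slice line none (some 9)] else acc) []
  let tuesday := (PySem.Str.splitlines s).foldl
    (fun acc line => if PySem.Str.isIn "T" line then acc ++ [PySem.Str.slice line none (some 9)] else acc) []
  let wednesday := (PySem.Str.splitlines s).foldl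
    (fun acc line => if PySem.Str.isIn "W" line then acc ++ [PySem.Str.slice line none (some 9)] else acc) []
  let thursday := (PySem.Str.splitlines s).foldl
    (fun acc line => if PySem.Str.isIn "TR" line then acc ++ [PySem.Str.slice line none (some 9)] else acc) []
  let friday := (PySem.Str.splitlines s).foldl
    (fun acc line => if PySem.Str.isIn "F" line then acc ++ [PySem.Str.slice line none (some 9)] else acc) []
  [monday, tuesday, wednesday, thursday, friday]

-- ===== PORT B =====
def getClassesOnDays_alt (s : String) : List (List String) :=
  let st := (PySem.Str.splitlines s).foldl
    (fun (acc : List String × List String × List String × List String × List String) line =>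
      let (mo, tu, we, th, fr) := acc
      let mo := if PySem.Str.isIn "M" line then mo ++ [PySem.Str.slice line none (some 9)] else mo
      let tu := if PySem.Str.isIn "T" line then tu ++ [PySem.Str.slice line none (some 9)] else tu
      let we := if PySem.Str.isIn "W" line then we ++ [PySem.Str.slice line none (some 9)] else we
      let th := if PySem.Str.isIn "TR" line then th ++ [PySem.Str.slice line none (some 9)] else th
      let fr := if PySem.Str.isIn "F" line then fr ++ [PySem.Str.slice line none (some 9)] else fr
      (mo, tu, we, th, fr)) ([], [], [], [], [])
  [st.1, st.2.1, st.2.2.1, st.2.2.2.1, st.2.2.2.2]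

-- ===== PRECONDITION & SPEC =====
def Spec_getClassesOnDays (s : String) (out : List (List String)) : Prop := out = getClassesOnDays_alt s
instance (s : String) (out : List (List String)) : Decidable (Spec_getClassesOnDays s out) := by unfold Spec_getClassesOnDays; infer_instance

-- ===== CLAIM (what is proved, stated in full; the proofs are below) =====
def Claim_equal_getClassesOnDays : Prop := ∀ (s : String), Dom_getClassesOnDays s → Spec_getClassesOnDays s (getClassesOnDays s)

-- ===== LEMMAS AND PROOFS =====

-- the fused fold computes the five independent folds componentwise
theorem fused_fold_eq (lines : List String)
    (mo tu we th fr : List String) :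
    lines.foldl
      (fun (acc : List String × List String × List String × List String × List String) line =>
        let (mo, tu, we, th, fr) := acc
        let mo := if PySem.Str.isIn "M" line then mo ++ [PySem.Str.slice line none (some 9)] else mo
        let tu := if PySem.Str.isIn "T" line then tu ++ [PySem.Str.slice line none (some 9)] else tu
        let we := if PySem.Str.isIn "W" line then we ++ [PySem.Str.slice line none (some 9)] else we
        let th := if PySem.Str.isIn "TR" line then th ++ [PySem.Str.slice line none (some 9)] else th
        let fr := if PySem.Str.isIn "F" line then fr ++ [PySem.Str.slice line none (some 9)] else fr
        (mo, tu, we, th, fr)) (mo, tu, we, th, fr)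
    = (lines.foldl (fun acc line => if PySem.Str.isIn "M" line then acc ++ [PySem.Str.slice line none (some 9)] else acc) mo,
       lines.foldl (fun acc line => if PySem.Str.isIn "T" line then acc ++ [PySem.Str.slice line none (some 9)] else acc) tu,
       lines.foldl (fun acc line => if PySem.Str.isIn "W" line then acc ++ [PySem.Str.slice line none (some 9)] else acc) we,
       lines.foldl (fun acc line => if PySem.Str.isIn "TR" line then acc ++ [PySem.Str.slice line none (some 9)] else acc) th,
       lines.foldl (fun acc line => if PySem.Str.isIn "F" line then acc ++ [PySem.Str.slice line none (some 9)] else acc) fr) := by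
  induction lines generalizing mo tu we th fr with
  | nil => rfl
  | cons l rest ih =>
      simp only [List.foldl_cons]
      exact ih _ _ _ _ _

-- ===== VERDICT (by name: the statement is the Claim_ definition above) =====
theorem getClassesOnDays_spec : Claim_equal_getClassesOnDays := by
  intro s _
  unfold Spec_getClassesOnDays getClassesOnDays getClassesOnDays_alt
  rw [fused_fold_eq]
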